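-- pv_equiv track=rewrite | github.com/YLL-0/SOLA | PY/Seminarska/f1_analiza.py | ekipe_in_dirkaci
-- ===== SOURCE A (Python) =====
-- def ekipe_in_dirkaci(rezultati):
--     ekipe = set()
--     # mnozica ekip
--     dirkaci_po_ekipah = {}
--
--     # gre preko vseh rezultatov
--     for zapis in rezultati:
--         ekipa = zapis['Ekipa']
--         ekipe.add(ekipa)
--
--         # ce ekipa se ne obstaja jo dodaj
--         if ekipa not in dirkaci_po_ekipah:
--             dirkaci_po_ekipah[ekipa] = set()
--
--         # dodaj dirkaca
--         dirkaci_po_ekipah[ekipa].add(zapis['Dirkac'])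
--
--     # spremeni v sortirane sezname
--     for ekipa in dirkaci_po_ekipah:
--         dirkaci_po_ekipah[ekipa] = sorted(list(dirkaci_po_ekipah[ekipa]))
--
--     return ekipe, dirkaci_po_ekipah
-- ===== SOURCE B (Python) =====
-- def ekipe_in_dirkaci(rezultati):
--     ekipe = [zapis['Ekipa'] for zapis in rezultati]
--     dirkaci_po_ekipah = {
--         ekipa: sorted({zapis['Dirkac'] for zapis in rezultati if zapis['Ekipa'] == ekipa})
--         for ekipa in dict.fromkeys(ekipe)
--     }
--     return set(ekipe), dirkaci_po_ekipah
-- ===== Notes on version B (the rewrite author's own statement) =====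
-- stated objective: simpler
-- what changed: A incrementally maintains a dict of sets (membership-checked key creation, per-record set.add, then a second pass sorting each set in place); B has no incremental state at all: it takes the distinct teams once with dict.fromkeys and builds the result dict by a comprehension that, per team, filters the records, collects drivers in a set comprehension and sorts them.
import Mathlib
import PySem

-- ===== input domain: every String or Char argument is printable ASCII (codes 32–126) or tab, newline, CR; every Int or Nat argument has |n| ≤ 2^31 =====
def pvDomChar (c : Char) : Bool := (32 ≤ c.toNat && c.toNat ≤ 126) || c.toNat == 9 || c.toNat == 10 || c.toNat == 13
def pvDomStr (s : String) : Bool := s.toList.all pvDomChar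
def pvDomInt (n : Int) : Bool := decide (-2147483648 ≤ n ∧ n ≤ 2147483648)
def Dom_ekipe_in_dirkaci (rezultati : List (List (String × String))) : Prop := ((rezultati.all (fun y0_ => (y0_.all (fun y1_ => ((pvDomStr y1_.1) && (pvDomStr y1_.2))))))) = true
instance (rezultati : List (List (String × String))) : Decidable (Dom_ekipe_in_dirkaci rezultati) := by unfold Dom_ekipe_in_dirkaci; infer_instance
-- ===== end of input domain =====

-- B replaces A's incrementally-maintained dict-of-sets (membership-checked inserts, then an
-- in-place sorting pass) by plain comprehensions: distinct teams once, then per team a filtered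
-- set comprehension, sorted; objective: simpler (not faster).

-- z[k] for a str→str dict (first match; total stand-in — Pre_ guarantees the key is present,
-- and there the value is exactly Python's z[k])
def pvKey (z : List (String × String)) (k : String) : String := (List.lookup k z).getD ""

-- ===== PORT A =====
-- the body of A's first for-loop, on the state (ekipe, dirkaci_po_ekipah)
def pvStepA (st : PySem.Set String × PySem.Dict String (PySem.Set String))
    (zapis : List (String × String)) : PySem.Set String × PySem.Dict String (PySem.Set String) :=
  let ekipa := pvKey zapis "Ekipa"
  (PySem.Set.add st.1 ekipa,
   (if PySem.Dict.contains st.2 ekipa then st.2 else PySem.Dict.insert st.2 ekipa []).modify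
      ekipa [] (fun s => PySem.Set.add s (pvKey zapis "Dirkac")))

def ekipe_in_dirkaci (rezultati : List (List (String × String))) :
    List String × (List (String × List String)) :=
  let st := rezultati.foldl pvStepA ([], PySem.Dict.empty)
  -- for ekipa in dirkaci_po_ekipah: dirkaci_po_ekipah[ekipa] = sorted(list(dirkaci_po_ekipah[ekipa]))
  let d2 := (PySem.Dict.keys st.2).foldl
    (fun d ekipa => d.insert ekipa (PySem.List.sorted (PySem.Dict.getD d ekipa []) (fun x => x) false)) st.2
  (st.1, d2.items)

-- ===== PORT B =====
def ekipe_in_dirkaci_alt (rezultati : List (List (String × String))) :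
    List String × (List (String × List String)) :=
  let ekipe := rezultati.map (fun zapis => pvKey zapis "Ekipa")
  -- dict comprehension over dict.fromkeys(ekipe): distinct keys in order, so the dict's items
  -- are exactly this map
  let dirkaci_po_ekipah := (PySem.List.dedup ekipe).map (fun ekipa =>
    (ekipa, PySem.List.sorted
        (PySem.Set.ofList ((rezultati.filter (fun zapis => pvKey zapis "Ekipa" == ekipa)).map
          (fun zapis => pvKey zapis "Dirkac")))
        (fun x => x) false))
  (PySem.Set.ofList ekipe, dirkaci_po_ekipah)

-- ===== PRECONDITION & SPEC =====
-- Pre_ excludes only records missing the key 'Ekipa' or 'Dirkac', on which Python A raises KeyError.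
def Pre_ekipe_in_dirkaci (rezultati : List (List (String × String))) : Prop :=
  ∀ z ∈ rezultati, (List.lookup "Ekipa" z).isSome = true ∧ (List.lookup "Dirkac" z).isSome = true
instance (rezultati : List (List (String × String))) : Decidable (Pre_ekipe_in_dirkaci rezultati) := by
  unfold Pre_ekipe_in_dirkaci; infer_instance

def pvWitness_ekipe_in_dirkaci : (List (List (String × String))) :=
  [[("Ekipa", "Red Bull"), ("Dirkac", "Max")], [("Ekipa", "Red Bull"), ("Dirkac", "Checo")]]

def Spec_ekipe_in_dirkaci (rezultati : List (List (String × String)))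
    (out : List String × (List (String × List String))) : Prop := out = ekipe_in_dirkaci_alt rezultati
instance (rezultati : List (List (String × String))) (out : List String × (List (String × List String))) :
    Decidable (Spec_ekipe_in_dirkaci rezultati out) := by unfold Spec_ekipe_in_dirkaci; infer_instance

-- ===== CLAIM (what is proved, stated in full; the proofs are below) =====
def Claim_equal_ekipe_in_dirkaci : Prop := ∀ (rezultati : List (List (String × String))),
  Dom_ekipe_in_dirkaci rezultati → Pre_ekipe_in_dirkaci rezultati →
  Spec_ekipe_in_dirkaci rezultati (ekipe_in_dirkaci rezultati)

-- ===== LEMMAS AND PROOFS =====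

-- modify is insert of the modified value (definitional)
theorem pv_modify_eq (d : PySem.Dict String (PySem.Set String)) (k : String)
    (f : PySem.Set String → PySem.Set String) :
    d.modify k [] f = d.insert k (f (d.getD k [])) := rfl

-- 'if k not in d: d[k] = set()' followed by the modify is just the modify
theorem pv_step_if_eq (d : PySem.Dict String (PySem.Set String)) (k : String)
    (f : PySem.Set String → PySem.Set String) :
    (if PySem.Dict.contains d k then d else PySem.Dict.insert d k []).modify k [] f
      = d.modify k [] f := by
  by_cases h : PySem.Dict.contains d k = true
  · simp [h]
  · rw [if_neg (by simp [h]), pv_modify_eq, pv_modify_eq, PySem.Dict.getD_insert_self,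
        PySem.Dict.insert_insert_self, PySem.Dict.getD_of_not_contains d [] (by simpa using h)]

-- A's pair-state loop splits into its two independent component loops
theorem pv_split (l : List (List (String × String))) (a : PySem.Set String)
    (b : PySem.Dict String (PySem.Set String)) :
    l.foldl pvStepA (a, b)
      = (l.foldl (fun s z => PySem.Set.add s (pvKey z "Ekipa")) a,
         l.foldl (fun d z => d.modify (pvKey z "Ekipa") []
           (fun s => PySem.Set.add s (pvKey z "Dirkac"))) b) := by
  induction l generalizing a b with
  | nil => rfl
  | cons z t ih =>
    simp only [List.foldl_cons]
    rw [show pvStepA (a, b) z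
        = (PySem.Set.add a (pvKey z "Ekipa"),
           (if PySem.Dict.contains b (pvKey z "Ekipa") then b
            else PySem.Dict.insert b (pvKey z "Ekipa") []).modify (pvKey z "Ekipa") []
             (fun s => PySem.Set.add s (pvKey z "Dirkac"))) from rfl,
        pv_step_if_eq]
    exact ih _ _

-- value stored at k after A's grouping loop
theorem pv_getD_fold (l : List (List (String × String)))
    (d : PySem.Dict String (PySem.Set String)) (k : String) :
    (l.foldl (fun d z => d.modify (pvKey z "Ekipa") []
        (fun s => PySem.Set.add s (pvKey z "Dirkac"))) d).getD k []
      = ((l.filter (fun z => pvKey z "Ekipa" == k)).map (fun z => pvKey z "Dirkac")).foldl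
          PySem.Set.add (d.getD k []) := by
  induction l generalizing d with
  | nil => rfl
  | cons z t ih =>
    simp only [List.foldl_cons, List.filter_cons, ih]
    by_cases h : pvKey z "Ekipa" = k
    · simp [h]
    · rw [PySem.Dict.getD_modify, if_neg (fun hh => h hh.symm)]
      simp [h]

-- keys after A's grouping loop
theorem pv_keys_fold (l : List (List (String × String)))
    (d : PySem.Dict String (PySem.Set String)) :
    (l.foldl (fun d z => d.modify (pvKey z "Ekipa") []
        (fun s => PySem.Set.add s (pvKey z "Dirkac"))) d).keys
      = PySem.Set.update d.keys (l.map (fun z => pvKey z "Ekipa")) :=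
  PySem.Dict.keys_foldl_modify_key l (fun z => pvKey z "Ekipa") [] (fun _ z s => PySem.Set.add s (pvKey z "Dirkac")) d

-- value stored at k after A's sorting loop over distinct keys
theorem pv_getD_sortfold (ks : List String) (d : PySem.Dict String (PySem.Set String))
    (k : String) (hnd : ks.Nodup) :
    (ks.foldl (fun d ekipa =>
        d.insert ekipa (PySem.List.sorted (PySem.Dict.getD d ekipa []) (fun x => x) false)) d).getD k []
      = if k ∈ ks then PySem.List.sorted (d.getD k []) (fun x => x) false else d.getD k [] := by
  induction ks generalizing d with
  | nil => simp
  | cons e t ih =>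
    rcases List.nodup_cons.mp hnd with ⟨he, ht⟩
    simp only [List.foldl_cons, ih _ ht]
    by_cases hk : k = e
    · subst hk
      simp [he, PySem.Dict.getD_insert_self]
    · simp [PySem.Dict.getD_insert, hk, List.mem_cons]

theorem pv_update_self (s : PySem.Set String) : PySem.Set.update s s = s := by
  rw [PySem.Set.update_eq_append_filter]
  have h : (PySem.Set.ofList s).filter (fun y => !(PySem.Set.contains s y)) = [] := by
    apply List.filter_eq_nil_iff.mpr
    intro y hy
    have hys : y ∈ s := (PySem.Set.mem_ofList s y).mp hy
    simp [hys]
  rw [h, List.append_nil]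

-- ===== VERDICT (by name: the statement is the Claim_ definition above) =====
theorem ekipe_in_dirkaci_spec : Claim_equal_ekipe_in_dirkaci := by
  intro rezultati _ _
  unfold Spec_ekipe_in_dirkaci ekipe_in_dirkaci ekipe_in_dirkaci_alt
  simp only [pv_split, PySem.List.dedup_eq_ofList]
  set EK := rezultati.map (fun z => pvKey z "Ekipa") with hEK
  set D := rezultati.foldl (fun d z => d.modify (pvKey z "Ekipa") []
    (fun s => PySem.Set.add s (pvKey z "Dirkac"))) PySem.Dict.empty with hD
  have hkeys : D.keys = PySem.Set.ofList EK := by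
    rw [hD, pv_keys_fold]
    exact PySem.Set.update_empty EK
  have hnodD : D.keys.Nodup := by
    rw [hkeys]; exact PySem.Set.nodup_ofList _
  have hget : ∀ k, D.getD k []
      = PySem.Set.ofList ((rezultati.filter (fun z => pvKey z "Ekipa" == k)).map
          (fun z => pvKey z "Dirkac")) := by
    intro k
    rw [hD, pv_getD_fold]
    rw [PySem.Set.ofList_eq_foldl]
    simp [PySem.Dict.getD_empty]
  -- the sorting loop
  set D2 := D.keys.foldl (fun d ekipa =>
      d.insert ekipa (PySem.List.sorted (PySem.Dict.getD d ekipa []) (fun x => x) false)) D with hD2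
  have hkeys2 : D2.keys = D.keys := by
    rw [hD2, PySem.Dict.keys_foldl_insert, pv_update_self]
  have hnod2 : D2.keys.Nodup := by rw [hkeys2]; exact hnodD
  have hitems : D2.items = D.keys.map (fun k => (k, D2.getD k [])) := by
    rw [PySem.Dict.items_eq_map_keys D2 hnod2 [], hkeys2]
  -- first components agree
  have hfst : rezultati.foldl (fun s z => PySem.Set.add s (pvKey z "Ekipa")) []
      = PySem.Set.ofList EK := by
    rw [PySem.Set.ofList_eq_foldl, hEK, List.foldl_map]
  refine Prod.ext hfst ?_
  -- second components agree
  show D2.items = (PySem.Set.ofList EK).map _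
  rw [hitems, hkeys]
  refine List.map_congr_left ?_
  intro k hk
  have hkD : k ∈ D.keys := by rw [hkeys]; exact hk
  rw [hD2, pv_getD_sortfold D.keys D k hnodD, if_pos hkD, hget k]
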